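-- pv_equiv track=rewrite | github.com/abjonnes/aoc2023 | aoc/day14.py | part2
-- ===== SOURCE A (Python) =====
-- import itertools
--
-- def rotate(map_, n=1):
--     for _ in range(n):
--         map_ = tuple(zip(*reversed(map_)))
--     return map_
--
-- def process_row(row):
--     result = ""
--     count = 0
--     last = 0
--     for idx, char in enumerate(row):
--         if char == "O":
--             count += 1
--         if char == "#":
--             spots = idx - last
--             result += "." * (spots - count) + "O" * count + "#"
--             last = idx + 1
--             count = 0
--     spots = idx - last + 1
--     result += "." * (spots - count) + "O" * count
--     return result
--
-- def roll_right(map_):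
--     return tuple(process_row(row) for row in map_)
--
-- def load(map_):
--     return sum(idx * row.count("O") for idx, row in enumerate(reversed(map_), start=1))
--
-- def part2(lines):
--     map_ = tuple(lines)
--     seen = dict()
--     for idx in itertools.count():
--         if idx % 4 == 0:
--             if map_ in seen:
--                 first = seen[map_]
--                 last = idx // 4
--                 break
--             seen[map_] = idx // 4
--         map_ = roll_right(rotate(map_))
--
--     period = last - first
--     target_idx = (1000000000 - first) % period + first
--     target_map = next(k for k, v in seen.items() if v == target_idx)
--     return load(target_map)
-- ===== SOURCE B (Python) =====
-- def rotate(grid):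
--     return tuple(zip(*reversed(grid)))
--
--
-- def roll_row(row):
--     segs = "".join(row).split("#")
--     return "#".join(
--         "." * (len(seg) - seg.count("O")) + "O" * seg.count("O") for seg in segs
--     )
--
--
-- def spin(grid):
--     for _ in range(4):
--         grid = tuple(roll_row(row) for row in rotate(grid))
--     return grid
--
--
-- def load(grid):
--     return sum(i * row.count("O") for i, row in enumerate(reversed(grid), start=1))
--
--
-- def part2(lines):
--     grid = tuple(lines)
--     seen = {}
--     states = []
--     while grid not in seen:
--         seen[grid] = len(states)
--         states.append(grid)
--         grid = spin(grid)
--     first = seen[grid]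
--     period = len(states) - first
--     target = (1000000000 - first) % period + first
--     return load(states[target])
-- ===== Notes on version B (the rewrite author's own statement) =====
-- stated objective: simpler
-- what changed: B replaces A's quarter-turn loop (itertools.count with idx%4 snapshotting and idx//4 keys) by a loop over whole spin cycles with a states list, rolls each row by splitting it on '#' and rebuilding each segment from its 'O' count instead of A's index/last/count scanning fold, and returns load(states[target]) by direct indexing instead of A's reverse scan of the dict for the key with the target value.
import Mathlib
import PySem

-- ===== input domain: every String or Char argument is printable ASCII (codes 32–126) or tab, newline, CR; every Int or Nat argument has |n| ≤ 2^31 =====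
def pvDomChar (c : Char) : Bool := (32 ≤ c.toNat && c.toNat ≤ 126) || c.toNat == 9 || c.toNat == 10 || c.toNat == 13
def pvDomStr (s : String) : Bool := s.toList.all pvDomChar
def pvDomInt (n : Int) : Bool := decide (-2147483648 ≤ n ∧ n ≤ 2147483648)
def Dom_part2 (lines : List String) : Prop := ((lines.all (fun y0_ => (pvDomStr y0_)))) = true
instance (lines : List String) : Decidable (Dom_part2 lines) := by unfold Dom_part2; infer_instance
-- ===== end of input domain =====

-- B rolls rows by splitting on '#' and rebuilding segments from their 'O' count, and iterates whole
-- spin cycles with a states list indexed directly, instead of A's quarter-turn loop with idx%4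
-- snapshots and a reverse value-scan of the dict; objective: simpler, same cost.


-- ===== PORT A =====
-- process_row: the for-loop over enumerate(row) with state (result, count, last); Python's
-- `idx` after the loop is len(row)-1, so the final flush uses idx_next - last - count.
-- On an empty row Python raises NameError (`idx` unbound); prA returns [] there (totalization
-- guard only; part2 never rolls an empty row).
def prAgo : List Char → Nat → Nat → Nat → List Char → List Char
  | [], idx, count, last, result =>
      result ++ List.replicate (idx - last - count) '.' ++ List.replicate count 'O'
  | c :: rest, idx, count, last, result =>
      if c = '#' then
        prAgo rest (idx + 1) 0 (idx + 1)
          (result ++ List.replicate (idx - last - (if c = 'O' then count + 1 else count)) '.'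
                  ++ List.replicate (if c = 'O' then count + 1 else count) 'O' ++ ['#'])
      else prAgo rest (idx + 1) (if c = 'O' then count + 1 else count) last result

def prA (row : List Char) : List Char :=
  match row with
  | [] => []
  | _ => prAgo row 0 0 0 []

-- rotate(map_) = tuple(zip(*reversed(map_))): the builtin zip is ported by its contract:
-- it yields min-length rows; column c of the result reads the reversed rows at position c
-- (getD is exact since c < every row length).
def rotA (m : List (List Char)) : List (List Char) :=
  match m.reverse with
  | [] => []
  | r0 :: rest =>
      (List.range (rest.foldl (fun acc r => Nat.min acc r.length) r0.length)).map
        (fun c => (r0 :: rest).map (fun r => r.getD c ' '))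

-- one idx-iteration of A's loop body: map_ = roll_right(rotate(map_))
def stepA (m : List (List Char)) : List (List Char) := (rotA m).map prA

-- load: sum(idx * row.count("O") for idx, row in enumerate(reversed(map_), start=1))
def loadA (g : List (List Char)) : Int :=
  ((g.reverse.zipIdx 1).map (fun p => ((p.2 : Int)) * ((p.1.count 'O' : Nat) : Int))).sum

-- A's itertools.count loop; the idx%4==0 checks make it a recursion per snapshot performing the
-- four intervening rotate+roll quarter steps; seen is the dict in insertion order, value idx//4 =
-- number of snapshots taken = seen.length.  fuel only totalizes the unbounded loop (see part2).
def loopA : Nat → List (List Char) → List (List (List Char) × Nat) → Int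
  | 0, _, _ => 0
  | fuel + 1, m, seen =>
      match seen.find? (fun p => decide (p.1 = m)) with
      | some pr =>
          -- break: first = seen[map_], last = idx//4; then the code after the loop
          let first := pr.2
          let period := seen.length - first
          let target := (1000000000 - first) % period + first
          -- next(k for k, v in seen.items() if v == target_idx); getD hit only if no key matches,
          -- where Python would raise StopIteration (proved unreachable)
          loadA (((seen.find? (fun p => decide (p.2 = target))).getD ([], 0)).1)
      | none => loopA fuel (stepA (stepA (stepA (stepA m)))) (seen ++ [(m, seen.length)])

-- fuel: snapshots are pairwise distinct and (after the first) are grids over {., O, #} whose total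
-- size is bounded by the input size, so the loop breaks long before this fuel is spent.
def part2 (lines : List String) : Int :=
  loopA (3 ^ ((lines.map String.length).sum + lines.length + 4) + 5) (lines.map String.toList) []

-- ===== PORT B =====
-- "".join(row).split("#"), on the char list (split("#") on "" yields [""], hence [[]])
def splitH : List Char → List (List Char)
  | [] => [[]]
  | c :: rest =>
      if c = '#' then [] :: splitH rest
      else
        match splitH rest with
        | s :: ss => (c :: s) :: ss
        | [] => [[c]]    -- unreachable: splitH never returns []

-- "." * (len(seg) - seg.count("O")) + "O" * seg.count("O")
def segRoll (s : List Char) : List Char :=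
  List.replicate (s.length - s.count 'O') '.' ++ List.replicate (s.count 'O') 'O'

-- roll_row = "#".join(segRoll(seg) for seg in segments)
def prB (row : List Char) : List Char :=
  List.intercalate ['#'] ((splitH row).map segRoll)

-- B's rotate is A's: tuple(zip(*reversed(grid))), ported identically
def rotB (m : List (List Char)) : List (List Char) :=
  match m.reverse with
  | [] => []
  | r0 :: rest =>
      (List.range (rest.foldl (fun acc r => Nat.min acc r.length) r0.length)).map
        (fun c => (r0 :: rest).map (fun r => r.getD c ' '))

def stepB (g : List (List Char)) : List (List Char) := (rotB g).map prB

-- spin: for _ in range(4): grid = tuple(roll_row(row) for row in rotate(grid))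
def spinB (g : List (List Char)) : List (List Char) := stepB (stepB (stepB (stepB g)))

def loadB (g : List (List Char)) : Int :=
  ((g.reverse.zipIdx 1).map (fun p => ((p.2 : Int)) * ((p.1.count 'O' : Nat) : Int))).sum

-- B's while-loop: seen dict (assoc list) plus the states list; on repeat, index states directly.
-- Same totalizing fuel as A's port.
def loopB : Nat → List (List Char) → List (List (List Char) × Nat) → List (List (List Char)) → Nat → Int
  | 0, _, _, _, _ => 0
  | fuel + 1, g, seen, states, _ =>
      match seen.find? (fun p => decide (p.1 = g)) with
      | some pr =>
          let first := pr.2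
          let period := states.length - first
          let target := (1000000000 - first) % period + first
          loadB (states.getD target [])
      | none =>
          loopB fuel (spinB g) (seen ++ [(g, states.length)]) (states ++ [g]) (states.length + 1)

def part2_alt (lines : List String) : Int :=
  loopB (3 ^ ((lines.map String.length).sum + lines.length + 4) + 5) (lines.map String.toList) [] [] 0

-- ===== PRECONDITION & SPEC =====
def Spec_part2 (lines : List String) (out : Int) : Prop := out = part2_alt lines
instance (lines : List String) (out : Int) : Decidable (Spec_part2 lines out) := by unfold Spec_part2; infer_instance

-- ===== CLAIM (what is proved, stated in full; the proofs are below) =====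
def Claim_equal_part2 : Prop := ∀ (lines : List String), Dom_part2 lines → Spec_part2 lines (part2 lines)

-- ===== LEMMAS AND PROOFS =====

theorem splitH_ne_nil (l : List Char) : splitH l ≠ [] := by
  induction l with
  | nil => simp [splitH]
  | cons c rest ih =>
      simp only [splitH]
      split
      · simp
      · cases h : splitH rest with
        | nil => exact absurd h ih
        | cons s ss => simp

-- the shape of prAgo's pending state rendered onto the remaining segments:
-- d = idx - last (chars consumed of the current segment), k = 'O's among them
def Rfun : Nat → Nat → List (List Char) → List Char
  | _, _, [] => []
  | d, k, s :: ss =>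
      (List.replicate (d + s.length - (k + s.count 'O')) '.'
        ++ List.replicate (k + s.count 'O') 'O')
      ++ (match ss with | [] => [] | _ :: _ => '#' :: Rfun 0 0 ss)

theorem Rfun_eq_intercalate (ss : List (List Char)) (h : ss ≠ []) :
    Rfun 0 0 ss = List.intercalate ['#'] (ss.map segRoll) := by
  induction ss with
  | nil => exact absurd rfl h
  | cons s ss ih =>
      cases ss with
      | nil => simp [Rfun, segRoll, List.intercalate]
      | cons t ts =>
          simp only [Rfun] at *
          rw [ih (by simp)]
          simp [segRoll, List.intercalate]

theorem Rfun_cons_shift (d k : Nat) (c : Char) (s : List Char) (ss : List (List Char)) :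
    Rfun d k ((c :: s) :: ss) = Rfun (d + 1) (if c = 'O' then k + 1 else k) (s :: ss) := by
  simp only [Rfun]
  have hcc : (c :: s).count 'O' = s.count 'O' + (if c = 'O' then 1 else 0) := by
    by_cases h : c = 'O' <;> simp [h]
  rw [hcc, List.length_cons]
  have h1 : d + (s.length + 1) - (k + (s.count 'O' + (if c = 'O' then 1 else 0)))
      = d + 1 + s.length - ((if c = 'O' then k + 1 else k) + s.count 'O') := by split <;> omega
  have h2 : k + (s.count 'O' + (if c = 'O' then 1 else 0))
      = (if c = 'O' then k + 1 else k) + s.count 'O' := by split <;> omega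
  rw [h1, h2]

theorem prAgo_eq_Rfun (row : List Char) :
    ∀ (d k last : Nat) (result : List Char), k ≤ d →
      prAgo row (last + d) k last result = result ++ Rfun d k (splitH row) := by
  induction row with
  | nil =>
      intro d k last result hk
      simp only [prAgo, splitH, Rfun]
      simp
  | cons c rest ih =>
      intro d k last result hk
      by_cases hc : c = '#'
      · subst hc
        simp only [prAgo, splitH, reduceIte]
        rw [show (if ('#' : Char) = 'O' then k + 1 else k) = k by simp]
        have h1 : last + d + 1 = (last + d + 1) + 0 := by omega
        rw [h1, ih 0 0 (last + d + 1) _ (Nat.le_refl 0)]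
        have h2 : last + d - last - k = d - k := by omega
        cases hs : splitH rest with
        | nil => exact absurd hs (splitH_ne_nil rest)
        | cons s ss => rw [h2]; simp [Rfun]
      · simp only [prAgo, splitH, if_neg hc]
        have h1 : last + d + 1 = last + (d + 1) := by omega
        rw [h1, ih (d + 1) (if c = 'O' then k + 1 else k) last result (by split <;> omega)]
        cases hs : splitH rest with
        | nil => exact absurd hs (splitH_ne_nil rest)
        | cons s ss =>
            simp only []
            rw [Rfun_cons_shift]

theorem prA_eq_prB (row : List Char) : prA row = prB row := by
  cases row with
  | nil => simp [prA, prB, splitH, segRoll, List.intercalate]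
  | cons c rest =>
      have h := prAgo_eq_Rfun (c :: rest) 0 0 0 [] (Nat.le_refl 0)
      simp only [Nat.add_zero, List.nil_append] at h
      simp only [prA, prB, h]
      exact Rfun_eq_intercalate _ (splitH_ne_nil _)

theorem step_eq (m : List (List Char)) : stepA m = stepB m := by
  simp only [stepA, stepB, rotA, rotB]
  exact List.map_congr_left (fun r _ => prA_eq_prB r)

theorem load_eq (g : List (List Char)) : loadA g = loadB g := by
  simp [loadA, loadB]

theorem zipIdx_append_singleton {α : Type} (xs : List α) (m : α) (k : Nat) :
    (xs ++ [m]).zipIdx k = xs.zipIdx k ++ [(m, k + xs.length)] := by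
  induction xs generalizing k with
  | nil => simp
  | cons x xs ih =>
      simp only [List.cons_append, List.zipIdx_cons, ih (k + 1), List.length_cons]
      simp
      omega

theorem find_snd_zipIdx {α : Type} [Inhabited α] (xs : List α) :
    ∀ (k t : Nat), k ≤ t → t < k + xs.length →
      (xs.zipIdx k).find? (fun p => decide (p.2 = t)) = some (xs.getD (t - k) default, t) := by
  induction xs with
  | nil => intro k t h1 h2; simp at h2; omega
  | cons x xs ih =>
      intro k t h1 h2
      simp only [List.zipIdx_cons, List.find?]
      by_cases hkt : k = t
      · subst hkt
        simp [List.getD]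
      · have : (decide (k = t)) = false := by simp [hkt]
        simp only [this]
        rw [ih (k + 1) t (by omega) (by simp at h2 ⊢; omega)]
        have : t - k = (t - (k + 1)) + 1 := by omega
        simp [this, List.getD]

theorem mem_zipIdx_snd_lt {α : Type} (xs : List α) :
    ∀ (k : Nat) (p : α × Nat), p ∈ xs.zipIdx k → p.2 < k + xs.length := by
  induction xs with
  | nil => intro k p h; simp at h
  | cons x xs ih =>
      intro k p h
      simp only [List.zipIdx_cons, List.mem_cons] at h
      cases h with
      | inl h => subst h; simp
      | inr h => have := ih (k + 1) p h; simp; omega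

theorem loop_eq (fuel : Nat) :
    ∀ (m : List (List Char)) (states : List (List (List Char))),
      loopA fuel m states.zipIdx = loopB fuel m states.zipIdx states states.length := by
  induction fuel with
  | zero => intro m states; simp [loopA, loopB]
  | succ fuel ih =>
      intro m states
      simp only [loopA, loopB]
      cases hf : (states.zipIdx).find? (fun p => decide (p.1 = m)) with
      | none =>
          simp only []
          have hlen : (states.zipIdx (0 : Nat)).length = states.length := by simp
          rw [hlen]
          have happ : states.zipIdx (0 : Nat) ++ [(m, states.length)]
              = (states ++ [m]).zipIdx := by
            rw [zipIdx_append_singleton states m 0]; simp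
          rw [happ, step_eq, step_eq, step_eq, step_eq]
          have := ih (stepB (stepB (stepB (stepB m)))) (states ++ [m])
          simpa [spinB] using this
      | some pr =>
          simp only []
          -- pr.2 < states.length, hence period ≥ 1 and target < states.length
          have hmem : pr ∈ states.zipIdx := List.mem_of_find?_eq_some hf
          have hlt : pr.2 < states.length := by simpa using mem_zipIdx_snd_lt states 0 pr hmem
          have hlen : (states.zipIdx (0 : Nat)).length = states.length := by simp
          rw [hlen]
          have hper : 0 < states.length - pr.2 := by omega
          set target := (1000000000 - pr.2) % (states.length - pr.2) + pr.2 with htarget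
          have htlt : target < states.length := by
            have := Nat.mod_lt (1000000000 - pr.2) hper
            omega
          rw [find_snd_zipIdx states 0 target (Nat.zero_le _) (by omega)]
          simp only [Option.getD_some, Nat.sub_zero]
          exact load_eq _

-- ===== VERDICT (by name: the statement is the Claim_ definition above) =====
theorem part2_spec : Claim_equal_part2 := by
  intro lines _
  unfold Spec_part2 part2 part2_alt
  simpa using loop_eq _ (lines.map String.toList) []
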